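-- pv_equiv track=rewrite | github.com/pathbreak/bert-lecture-summarizer | summarizer/summarizerv2.py | include_coreferenced_sentences
-- ===== SOURCE A (Python) =====
-- def include_coreferenced_sentences(sel_sentences, coref_sentences):
--     summary_sentence_indexes = []
--     for sel_sent_idx in sel_sentences:
--         for sents_of_chain in coref_sentences:
--             if sel_sent_idx in sents_of_chain:
--                 for coref_sent_i in sents_of_chain:
--                     if coref_sent_i < sel_sent_idx:
--                         summary_sentence_indexes.append(coref_sent_i)
--         summary_sentence_indexes.append(sel_sent_idx)
--
--     return summary_sentence_indexes
-- ===== SOURCE B (Python) =====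
-- def include_coreferenced_sentences(sel_sentences, coref_sentences):
--     # Precompute, in one pass over the chains, for each sentence index the
--     # concatenation (in chain order, chains in order) of its earlier
--     # coreferenced sentence indexes; then each selected sentence is a lookup.
--     earlier = {}
--     for chain in coref_sentences:
--         seen = set()
--         for v in chain:
--             if v not in seen:
--                 seen.add(v)
--                 earlier.setdefault(v, []).extend(x for x in chain if x < v)
--     out = []
--     for s in sel_sentences:
--         out.extend(earlier.get(s, []))
--         out.append(s)
--     return out
-- ===== Notes on version B (the rewrite author's own statement) =====
-- stated objective: faster
-- what changed: B precomputes in a single pass over the chains a dict mapping each sentence index to its concatenated list of earlier coreferenced indexes, so each selected sentence becomes one dict lookup instead of a scan of every chain.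
import Mathlib
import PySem

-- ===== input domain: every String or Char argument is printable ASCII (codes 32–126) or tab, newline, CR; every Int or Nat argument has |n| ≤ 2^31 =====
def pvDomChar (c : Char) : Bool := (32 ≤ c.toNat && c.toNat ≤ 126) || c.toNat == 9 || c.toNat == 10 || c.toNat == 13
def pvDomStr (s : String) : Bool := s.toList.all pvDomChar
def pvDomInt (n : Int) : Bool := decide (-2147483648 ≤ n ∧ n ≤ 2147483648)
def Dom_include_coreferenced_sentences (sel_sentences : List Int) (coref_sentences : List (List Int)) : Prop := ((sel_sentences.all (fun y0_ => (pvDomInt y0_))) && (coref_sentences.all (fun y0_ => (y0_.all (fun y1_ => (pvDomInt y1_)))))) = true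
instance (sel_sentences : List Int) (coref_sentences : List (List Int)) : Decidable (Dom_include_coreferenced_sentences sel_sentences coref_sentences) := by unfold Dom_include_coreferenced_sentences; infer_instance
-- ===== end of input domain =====

-- B precomputes a dict from sentence index to its earlier coreferenced indexes in one
-- pass over the chains, replacing A's per-selected-sentence scan of all chains (faster).


-- ===== PORT A =====
def include_coreferenced_sentences (sel_sentences : List Int) (coref_sentences : List (List Int)) : List Int :=
  (sel_sentences.foldl (fun acc sel_sent_idx =>
    (coref_sentences.foldl (fun acc2 sents_of_chain =>
      if sel_sent_idx ∈ sents_of_chain then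
        sents_of_chain.foldl (fun acc3 coref_sent_i =>
          if coref_sent_i < sel_sent_idx then acc3 ++ [coref_sent_i] else acc3) acc2
      else acc2) acc) ++ [sel_sent_idx]) [])

-- ===== PORT B =====
-- earlier = {}; for chain: seen = set(); for v in chain: if v not in seen: seen.add(v); earlier.setdefault(v,[]).extend(x for x in chain if x < v)
def pvBuildEarlier (coref_sentences : List (List Int)) : PySem.Dict Int (List Int) :=
  coref_sentences.foldl (fun earlier chain =>
    (chain.foldl (fun (st : PySem.Dict Int (List Int) × PySem.Set Int) v =>
      if PySem.Set.contains st.2 v then st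
      else (st.1.insert v (st.1.getD v [] ++ chain.filter (fun x => decide (x < v))),
            PySem.Set.add st.2 v))
      (earlier, PySem.Set.empty)).1)
    PySem.Dict.empty

def include_coreferenced_sentences_alt (sel_sentences : List Int) (coref_sentences : List (List Int)) : List Int :=
  let earlier := pvBuildEarlier coref_sentences
  sel_sentences.foldl (fun out s => (out ++ earlier.getD s []) ++ [s]) []

-- ===== PRECONDITION & SPEC =====
def Spec_include_coreferenced_sentences (sel_sentences : List Int) (coref_sentences : List (List Int)) (out : List Int) : Prop := out = include_coreferenced_sentences_alt sel_sentences coref_sentences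
instance (sel_sentences : List Int) (coref_sentences : List (List Int)) (out : List Int) : Decidable (Spec_include_coreferenced_sentences sel_sentences coref_sentences out) := by unfold Spec_include_coreferenced_sentences; infer_instance

-- ===== CLAIM (what is proved, stated in full; the proofs are below) =====
def Claim_equal_include_coreferenced_sentences : Prop := ∀ (sel_sentences : List Int) (coref_sentences : List (List Int)), Dom_include_coreferenced_sentences sel_sentences coref_sentences → Spec_include_coreferenced_sentences sel_sentences coref_sentences (include_coreferenced_sentences sel_sentences coref_sentences)

-- ===== LEMMAS AND PROOFS =====

-- the common value: for one selected index, its earlier coreferenced indexes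
def earlierOf (s : Int) (chains : List (List Int)) : List Int :=
  chains.flatMap (fun c => if s ∈ c then c.filter (fun x => decide (x < s)) else [])

-- A side: the two inner loops compute acc ++ earlierOf s chains
theorem a_inner (s : Int) (chains : List (List Int)) (acc : List Int) :
    chains.foldl (fun acc2 c =>
      if s ∈ c then
        c.foldl (fun acc3 x => if x < s then acc3 ++ [x] else acc3) acc2
      else acc2) acc = acc ++ earlierOf s chains := by
  induction chains generalizing acc with
  | nil => simp [earlierOf]
  | cons c rest ih =>
    simp only [List.foldl_cons, earlierOf, List.flatMap_cons]
    rw [ih]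
    by_cases h : s ∈ c
    · simp [h, PySem.List.foldl_append_ite_eq_filter, earlierOf, List.append_assoc]
    · simp [h, earlierOf]

theorem a_eq (sel : List Int) (chains : List (List Int)) (acc : List Int) :
    sel.foldl (fun acc s =>
      (chains.foldl (fun acc2 c =>
        if s ∈ c then
          c.foldl (fun acc3 x => if x < s then acc3 ++ [x] else acc3) acc2
        else acc2) acc) ++ [s]) acc
      = acc ++ sel.flatMap (fun s => earlierOf s chains ++ [s]) := by
  induction sel generalizing acc with
  | nil => simp
  | cons s rest ih =>
    rw [List.foldl_cons, a_inner, ih, List.flatMap_cons]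
    simp [List.append_assoc]

-- B side, inner loop over one chain: effect on getD for any key s
theorem b_inner (chain : List Int) (s : Int) (l : List Int) (seen : PySem.Set Int)
    (d : PySem.Dict Int (List Int)) :
    ((l.foldl (fun (st : PySem.Dict Int (List Int) × PySem.Set Int) v =>
      if PySem.Set.contains st.2 v then st
      else (st.1.insert v (st.1.getD v [] ++ chain.filter (fun x => decide (x < v))),
            PySem.Set.add st.2 v)) (d, seen)).1).getD s []
    = if s ∈ l ∧ s ∉ seen then d.getD s [] ++ chain.filter (fun x => decide (x < s))
      else d.getD s [] := by
  induction l generalizing seen d with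
  | nil => simp
  | cons v rest ih =>
    simp only [List.foldl_cons]
    by_cases hv : PySem.Set.contains seen v
    · rw [if_pos hv, ih]
      have hvmem : v ∈ seen := by
        simpa [PySem.Set.contains] using hv
      by_cases hs : s = v
      · subst hs; simp [hvmem]
      · simp [List.mem_cons, hs]
    · rw [if_neg hv, ih]
      have hvnot : v ∉ seen := by
        simpa [PySem.Set.contains] using hv
      by_cases hs : s = v
      · subst hs
        have h1 : s ∈ PySem.Set.add seen s := by simp [PySem.Set.mem_add]
        rw [if_neg (by simp [h1])]
        rw [if_pos ⟨List.mem_cons_self, hvnot⟩]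
        simp [PySem.Dict.getD_insert]
      · have : (s ∈ PySem.Set.add seen v) ↔ s ∈ seen := by
          simp [PySem.Set.mem_add, hs]
        simp [PySem.Dict.getD_insert, hs, this, List.mem_cons]

-- B side: getD on the built dict is earlierOf
theorem b_build (chains : List (List Int)) (s : Int) (d : PySem.Dict Int (List Int)) :
    (chains.foldl (fun earlier chain =>
      (chain.foldl (fun (st : PySem.Dict Int (List Int) × PySem.Set Int) v =>
        if PySem.Set.contains st.2 v then st
        else (st.1.insert v (st.1.getD v [] ++ chain.filter (fun x => decide (x < v))),
              PySem.Set.add st.2 v)) (earlier, PySem.Set.empty)).1) d).getD s []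
    = d.getD s [] ++ earlierOf s chains := by
  induction chains generalizing d with
  | nil => simp [earlierOf]
  | cons c rest ih =>
    simp only [List.foldl_cons, earlierOf, List.flatMap_cons]
    rw [ih, b_inner]
    by_cases h : s ∈ c
    · simp [h, PySem.Set.empty, earlierOf, List.append_assoc]
    · simp [h, PySem.Set.empty, earlierOf]

theorem b_eq (sel : List Int) (chains : List (List Int)) (acc : List Int) :
    sel.foldl (fun out s => (out ++ (pvBuildEarlier chains).getD s []) ++ [s]) acc
      = acc ++ sel.flatMap (fun s => earlierOf s chains ++ [s]) := by
  induction sel generalizing acc with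
  | nil => simp
  | cons s rest ih =>
    have h : (pvBuildEarlier chains).getD s [] = earlierOf s chains := by
      unfold pvBuildEarlier
      rw [b_build]
      simp [PySem.Dict.empty, PySem.Dict.getD, PySem.Dict.get?]
    rw [List.foldl_cons, ih, h, List.flatMap_cons]
    simp [List.append_assoc]

-- ===== VERDICT (by name: the statement is the Claim_ definition above) =====
theorem include_coreferenced_sentences_spec : Claim_equal_include_coreferenced_sentences := by
  intro sel chains _
  show _ = _
  unfold include_coreferenced_sentences include_coreferenced_sentences_alt
  rw [a_eq, b_eq]
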